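-- pv_equiv track=rewrite | github.com/TessFerrandez/AdventOfCode-Python | 2021/day10.py | get_missing_chars
-- ===== SOURCE A (Python) =====
-- matching = {"(": ")", "[": "]", "{": "}", "<": ">"}
--
-- def get_missing_chars(sub_system: str) -> str:
--     open = []
--     for ch in sub_system:
--         if ch in matching:
--             open.append(ch)
--         elif len(open) > 0 and matching[open[-1]] == ch:
--             open.pop()
--         else:
--             return ""
--
--     return "".join([matching[open[-i]] for i in range(1, len(open) + 1)])
-- ===== SOURCE B (Python) =====
-- matching = {"(": ")", "[": "]", "{": "}", "<": ">"}
--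
--
-- def _cancel_pass(s):
--     # one left-to-right sweep deleting non-overlapping adjacent matching pairs
--     out = []
--     i = 0
--     n = len(s)
--     while i < n:
--         if i + 1 < n and s[i] in matching and matching[s[i]] == s[i + 1]:
--             i += 2
--         else:
--             out.append(s[i])
--             i += 1
--     return "".join(out)
--
--
-- def get_missing_chars(sub_system: str) -> str:
--     s = sub_system
--     while True:
--         t = _cancel_pass(s)
--         if t == s:
--             break
--         s = t
--     if not all(ch in matching for ch in s):
--         return ""
--     return "".join(matching[ch] for ch in reversed(s))
-- ===== Notes on version B (the rewrite author's own statement) =====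
-- stated objective: alternative
-- what changed: Replaces A's left-to-right stack machine by a rewriting fixpoint: repeatedly sweep the string deleting adjacent matching bracket pairs until nothing changes, then return the empty string if anything but opening brackets remains, else the closers of the remaining openers in reverse order.
import Mathlib
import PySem

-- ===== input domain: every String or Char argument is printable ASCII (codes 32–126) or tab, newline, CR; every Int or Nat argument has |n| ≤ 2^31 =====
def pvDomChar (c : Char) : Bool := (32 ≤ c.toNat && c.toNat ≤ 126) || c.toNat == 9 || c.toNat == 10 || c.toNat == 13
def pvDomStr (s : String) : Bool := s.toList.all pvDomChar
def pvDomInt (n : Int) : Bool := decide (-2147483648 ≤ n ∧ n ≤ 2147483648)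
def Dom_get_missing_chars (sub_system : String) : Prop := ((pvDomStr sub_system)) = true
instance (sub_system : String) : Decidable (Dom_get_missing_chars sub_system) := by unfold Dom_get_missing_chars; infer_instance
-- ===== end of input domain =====

-- B replaces A's stack machine by a fixpoint of pair-deletion sweeps (alternative decomposition, not faster).
-- ===== PORT A =====

-- the module-level dict `matching`
def pvMatching : PySem.Dict Char Char :=
  PySem.Dict.mk [('(', ')'), ('[', ']'), ('{', '}'), ('<', '>')]

-- the for-loop of A: state = the `open` stack (head = Python's open[-1]); none = the early `return ""`.
-- `matching[open[-1]]` can never raise KeyError (only dict keys are pushed), so it is ported as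
-- `get? top == some ch`, which is exact on every reachable state.
def runA : List Char → List Char → Option (List Char)
  | opens, [] => some opens
  | opens, ch :: rest =>
    if pvMatching.contains ch then runA (ch :: opens) rest
    else
      match opens with
      | [] => none
      | top :: tail => if pvMatching.get? top == some ch then runA tail rest else none

def get_missing_chars (sub_system : String) : String :=
  match runA [] sub_system.toList with
  | none => ""
  -- "".join([matching[open[-i]] for i in range(1, len(open)+1)]); matching[·] cannot raise here
  | some opens => String.ofList (opens.map (fun c => (pvMatching.get? c).getD c))

-- ===== PORT B =====

-- _cancel_pass: one sweep deleting non-overlapping adjacent matching pairs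
def pass1 : List Char → List Char
  | c1 :: c2 :: rest =>
    if pvMatching.get? c1 == some c2 then pass1 rest else c1 :: pass1 (c2 :: rest)
  | l => l

theorem length_pass1_le (l : List Char) : (pass1 l).length ≤ l.length := by
  fun_induction pass1 l with
  | case1 c1 c2 rest h ih => simp only [List.length_cons] at ih ⊢; omega
  | case2 c1 c2 rest h ih => simp only [List.length_cons] at ih ⊢; omega
  | case3 l h => exact le_refl _

theorem pass1_eq_or_lt (l : List Char) : pass1 l = l ∨ (pass1 l).length < l.length := by
  fun_induction pass1 l with
  | case1 c1 c2 rest h ih =>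
    right
    have := length_pass1_le rest
    simp only [List.length_cons] at *
    omega
  | case2 c1 c2 rest h ih =>
    rcases ih with he | hl
    · left; simp [he]
    · right; simp only [List.length_cons] at hl ⊢; omega
  | case3 l h => left; rfl

-- the while-True loop of B: iterate the sweep to a fixpoint
def reduceB (l : List Char) : List Char :=
  let t := pass1 l
  if t = l then l else reduceB t
termination_by l.length
decreasing_by
  rename_i hne
  rcases pass1_eq_or_lt l with he | hl
  · exact absurd he hne
  · exact hl

def get_missing_chars_alt (sub_system : String) : String :=
  let r := reduceB sub_system.toList
  if r.all (fun c => pvMatching.contains c) then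
    String.ofList (r.reverse.map (fun c => (pvMatching.get? c).getD c))
  else ""

-- ===== PRECONDITION & SPEC =====
def Spec_get_missing_chars (sub_system : String) (out : String) : Prop := out = get_missing_chars_alt sub_system
instance (sub_system : String) (out : String) : Decidable (Spec_get_missing_chars sub_system out) := by unfold Spec_get_missing_chars; infer_instance

-- ===== CLAIM (what is proved, stated in full; the proofs are below) =====
def Claim_equal_get_missing_chars : Prop := ∀ (sub_system : String), Dom_get_missing_chars sub_system → Spec_get_missing_chars sub_system (get_missing_chars sub_system)

-- ===== LEMMAS AND PROOFS =====

theorem pair_cases {c1 c2 : Char} (h : pvMatching.get? c1 = some c2) :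
    (c1 = '(' ∧ c2 = ')') ∨ (c1 = '[' ∧ c2 = ']') ∨ (c1 = '{' ∧ c2 = '}') ∨ (c1 = '<' ∧ c2 = '>') := by
  simp only [pvMatching, PySem.Dict.get?_mk_cons] at h
  split_ifs at h with h1 h2 h3 h4
  · exact Or.inl ⟨(beq_iff_eq.mp h1).symm, (Option.some_inj.mp h).symm⟩
  · exact Or.inr (Or.inl ⟨(beq_iff_eq.mp h2).symm, (Option.some_inj.mp h).symm⟩)
  · exact Or.inr (Or.inr (Or.inl ⟨(beq_iff_eq.mp h3).symm, (Option.some_inj.mp h).symm⟩))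
  · exact Or.inr (Or.inr (Or.inr ⟨(beq_iff_eq.mp h4).symm, (Option.some_inj.mp h).symm⟩))
  · simp [PySem.Dict.get?] at h

theorem contains_of_pair {c1 c2 : Char} (h : pvMatching.get? c1 = some c2) :
    pvMatching.contains c1 = true := by
  rw [PySem.Dict.contains_eq_isSome_get?, h]; rfl

theorem not_contains_closer {c1 c2 : Char} (h : pvMatching.get? c1 = some c2) :
    pvMatching.contains c2 = false := by
  rcases pair_cases h with ⟨_, rfl⟩ | ⟨_, rfl⟩ | ⟨_, rfl⟩ | ⟨_, rfl⟩ <;> decide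

-- A's stack machine is invariant under one cancellation sweep
theorem runA_pass1 (l : List Char) : ∀ st, runA st (pass1 l) = runA st l := by
  fun_induction pass1 l with
  | case1 c1 c2 rest h ih =>
    intro st
    have hb : pvMatching.get? c1 = some c2 := by simpa using h
    have hc1 := contains_of_pair hb
    have hc2 := not_contains_closer hb
    rw [ih st]
    simp [runA, hc1, hc2, h]
  | case2 c1 c2 rest h ih =>
    intro st
    by_cases hc : pvMatching.contains c1 = true
    · simp only [runA, hc, if_true]
      exact ih _
    · cases st with
      | nil => simp [runA, hc]
      | cons t ts =>
        by_cases hm : (pvMatching.get? t == some c1) = true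
        · simp only [runA, hc, hm, if_true]
          exact ih _
        · simp [runA, hc, hm]
  | case3 l h => intro st; rfl

-- hence invariant under the whole fixpoint loop
theorem runA_reduceB (l : List Char) : ∀ st, runA st (reduceB l) = runA st l := by
  fun_induction reduceB l with
  | case1 l t h => intro st; rfl
  | case2 l t h ih => intro st; rw [ih st]; exact runA_pass1 l st

-- the loop result is a fixpoint of the sweep
theorem pass1_reduceB (l : List Char) : pass1 (reduceB l) = reduceB l := by
  fun_induction reduceB l with
  | case1 l t h => exact h
  | case2 l t h ih => exact ih

-- head-compatibility of the stack with the rest of the input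
def okTop (st l : List Char) : Prop :=
  ∀ t c, st.head? = some t → l.head? = some c → (pvMatching.get? t == some c) = false

-- on a sweep-fixpoint, A's machine succeeds iff only openers remain, yielding them reversed on the stack
theorem runA_of_fix (l : List Char) : ∀ st, pass1 l = l → okTop st l →
    runA st l = if l.all (fun c => pvMatching.contains c) then some (l.reverse ++ st) else none := by
  induction l with
  | nil => intro st _ _; simp [runA]
  | cons c rest ih =>
    intro st hfix hok
    by_cases hc : pvMatching.contains c = true
    · have hrest : pass1 rest = rest ∧ okTop (c :: st) rest := by
        cases rest with
        | nil => exact ⟨rfl, by intro t c' _ hc'; simp at hc'⟩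
        | cons c2 rest' =>
          have hp : (pvMatching.get? c == some c2) = false := by
            by_contra hne
            have hp' : (pvMatching.get? c == some c2) = true := by
              revert hne; cases (pvMatching.get? c == some c2) <;> simp
            have : pass1 (c :: c2 :: rest') = pass1 rest' := by simp [pass1, hp']
            have hlen := length_pass1_le rest'
            rw [hfix] at this
            have := congrArg List.length this
            simp only [List.length_cons] at this
            omega
          have hstep : pass1 (c :: c2 :: rest') = c :: pass1 (c2 :: rest') := by
            simp [pass1, hp]
          rw [hfix] at hstep
          injection hstep with _ h2
          refine ⟨h2.symm, ?_⟩
          intro t c' ht hc'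
          simp only [List.head?_cons, Option.some.injEq] at ht hc'
          subst ht; subst hc'
          exact hp
      have hstep : runA st (c :: rest) = runA (c :: st) rest := by simp [runA, hc]
      rw [hstep, ih (c :: st) hrest.1 hrest.2]
      by_cases hall : rest.all (fun c => pvMatching.contains c) = true
      · simp [hall, hc, List.append_assoc]
      · simp only [Bool.not_eq_true] at hall
        simp [hall, hc]
    · have hc' : pvMatching.contains c = false := by
        revert hc; cases pvMatching.contains c <;> simp
      cases st with
      | nil => simp [runA, hc']
      | cons t ts =>
        have := hok t c rfl rfl
        simp [runA, hc', this]

-- ===== VERDICT (by name: the statement is the Claim_ definition above) =====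
theorem get_missing_chars_spec : Claim_equal_get_missing_chars := by
  intro s _
  unfold Spec_get_missing_chars get_missing_chars get_missing_chars_alt
  have h1 : runA [] s.toList = runA [] (reduceB s.toList) := (runA_reduceB s.toList []).symm
  have h2 := runA_of_fix (reduceB s.toList) [] (pass1_reduceB s.toList)
      (by intro t c ht _; simp at ht)
  rw [h1, h2]
  by_cases hall : (reduceB s.toList).all (fun c => pvMatching.contains c) = true
  · simp [hall]
  · simp only [Bool.not_eq_true] at hall
    simp [hall]
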